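-- pv_equiv track=rewrite | github.com/JetBrains-Research/project-adaptation-experiments | rag/draco/preprocess.py | _get_all_module_path
-- ===== SOURCE A (Python) =====
-- def _get_all_module_path(file_list) -> dict[set[str]]:
--     # Returns dict {folder name: }.
--     py_dict = {}
--
--     for file in file_list:
--         parts = file.split('/')
--
--         base_part = parts[0]
--
--         for part in parts[1:]:
--             if base_part not in py_dict:
--                 py_dict[base_part] = set()
--             py_dict[base_part].add(base_part + '/' + part)
--             base_part = base_part + '/' + part
--
--     return py_dict
-- ===== SOURCE B (Python) =====
-- def _get_all_module_path(file_list) -> dict[set[str]]: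
--     # Work on the raw string: the chain of path prefixes of a file is exactly
--     # its character prefixes cut at the '/' positions (plus the full string),
--     # so scan slash indices and slice — no split, no join, no part accumulator.
--     py_dict = {}
--
--     for file in file_list:
--         cuts = [i for i, ch in enumerate(file) if ch == '/'] + [len(file)]
--         for a, b in zip(cuts, cuts[1:]):
--             py_dict.setdefault(file[:a], set()).add(file[:b])
--
--     return py_dict
-- ===== Notes on version B (the rewrite author's own statement) =====
-- stated objective: alternative
-- what changed: B never splits or joins: it scans each file string for the character positions of '/' and records, for each consecutive pair of cut positions, the string-prefix-before-the-first as parent and the string-prefix-before-the-second as child, where A splits into parts and concatenates them back piece by piece in a running accumulator.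
import Mathlib
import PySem

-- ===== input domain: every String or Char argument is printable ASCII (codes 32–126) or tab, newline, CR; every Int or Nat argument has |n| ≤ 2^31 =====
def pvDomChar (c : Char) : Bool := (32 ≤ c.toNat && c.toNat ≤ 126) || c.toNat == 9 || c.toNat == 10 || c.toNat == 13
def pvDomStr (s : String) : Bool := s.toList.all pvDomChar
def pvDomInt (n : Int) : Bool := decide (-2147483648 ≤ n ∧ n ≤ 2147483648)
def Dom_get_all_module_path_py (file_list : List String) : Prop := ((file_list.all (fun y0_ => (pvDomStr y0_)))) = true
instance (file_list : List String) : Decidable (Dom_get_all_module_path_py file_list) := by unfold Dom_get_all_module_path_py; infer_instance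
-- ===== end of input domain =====

-- B scans each file string for the character positions of '/' and slices prefixes
-- there, instead of A's split-into-parts and piecewise re-concatenation; alternative
-- algorithm on a different representation, same cost class.

-- ===== PORT A =====
def get_all_module_path_py (file_list : List String) : List (String × List String) :=
  (file_list.foldl
    (fun (py_dict : PySem.Dict String (PySem.Set String)) file =>
      let parts := (PySem.Str.split? file "/").getD []
      match parts with
      | [] => py_dict            -- unreachable: str.split('/') never returns an empty list
      | base :: rest =>
        (rest.foldl
          (fun (st : PySem.Dict String (PySem.Set String) × String) part =>
            let d := st.1
            let base_part := st.2
            let d := if d.contains base_part = true then d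
                     else d.insert base_part PySem.Set.empty
            let d := d.modify base_part PySem.Set.empty
                       (fun s => PySem.Set.add s (base_part ++ "/" ++ part))
            (d, base_part ++ "/" ++ part))
          (py_dict, base)).1)
    PySem.Dict.empty).items

-- ===== PORT B =====
def get_all_module_path_py_alt (file_list : List String) : List (String × List String) :=
  (file_list.foldl
    (fun (py_dict : PySem.Dict String (PySem.Set String)) file =>
      -- cuts = [i for i, ch in enumerate(file) if ch == '/'] + [len(file)]
      let cuts : List Int :=
        ((PySem.List.enumerate file.toList 0).filter (fun p => p.2 == '/')).map (·.1)
          ++ [PySem.Str.len file]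
      -- for a, b in zip(cuts, cuts[1:]): py_dict.setdefault(file[:a], set()).add(file[:b])
      -- (setdefault(k, set()).add(v) stores d.get(k, set()) ∪ {v} at k: Dict.modify)
      (cuts.zip cuts.tail).foldl
        (fun d ab =>
          d.modify (PySem.Str.slice file none (some ab.1)) PySem.Set.empty
            (fun s => PySem.Set.add s (PySem.Str.slice file none (some ab.2))))
        py_dict)
    PySem.Dict.empty).items

-- ===== PRECONDITION & SPEC =====
def Spec_get_all_module_path_py (file_list : List String) (out : List (String × List String)) : Prop := out = get_all_module_path_py_alt file_list
instance (file_list : List String) (out : List (String × List String)) : Decidable (Spec_get_all_module_path_py file_list out) := by unfold Spec_get_all_module_path_py; infer_instance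

-- ===== CLAIM (what is proved, stated in full; the proofs are below) =====
def Claim_equal_get_all_module_path_py : Prop := ∀ (file_list : List String), Dom_get_all_module_path_py file_list → Spec_get_all_module_path_py file_list (get_all_module_path_py file_list)

-- ===== LEMMAS AND PROOFS =====

-- the cumulative prefix list of a parts list (['/'.join(parts[:i+1]) for i in range(len(parts))])
def pvPrefixes (parts : List String) : List String :=
  (List.range parts.length).map (fun i => PySem.Str.join "/" (parts.take (i + 1)))

-- structural form of str.split('/'): current-part accumulator
def pvSp (pre : List Char) : List Char → List (List Char)
  | [] => [pre]
  | c :: t => if c = '/' then pre :: pvSp [] t else pvSp (pre ++ [c]) t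

-- the prefix list of pre ++ cs cut at the '/' positions of cs (and at the end)
def pvCutsAfter (pre : List Char) : List Char → List (List Char)
  | [] => [pre]
  | c :: t => if c = '/' then pre :: pvCutsAfter (pre ++ [c]) t else pvCutsAfter (pre ++ [c]) t

theorem pv_join_singleton (sep x : String) : PySem.Str.join sep [x] = x := by
  apply String.ext
  simp [PySem.Str.toList_join, PySem.Chars.join_singleton]

theorem pv_join_glue (sep a b : String) (l : List String) :
    PySem.Str.join sep (a :: b :: l) = PySem.Str.join sep ((a ++ sep ++ b) :: l) := by
  apply String.ext
  cases l with
  | nil =>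
      simp [PySem.Str.toList_join, PySem.Chars.join_cons_cons, PySem.Chars.join_singleton]
  | cons c l' =>
      simp [PySem.Str.toList_join, PySem.Chars.join_cons_cons]

theorem pv_prefixes_single (b : String) : pvPrefixes [b] = [b] := by
  simp [pvPrefixes, pv_join_singleton]

theorem pv_prefixes_cons_cons (b p : String) (l : List String) :
    pvPrefixes (b :: p :: l) = b :: pvPrefixes ((b ++ "/" ++ p) :: l) := by
  unfold pvPrefixes
  simp only [List.length_cons]
  rw [List.range_succ_eq_map]
  simp only [List.map_cons, List.map_map]
  congr 1
  · simpa using pv_join_singleton "/" b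
  · apply List.map_congr_left
    intro i _
    simp only [Function.comp_apply, List.take_succ_cons]
    exact pv_join_glue "/" b p (l.take i)

theorem pv_prefixes_head (b : String) (l : List String) :
    pvPrefixes (b :: l) = b :: (pvPrefixes (b :: l)).tail := by
  cases l with
  | nil => simp [pv_prefixes_single]
  | cons p l' => rw [pv_prefixes_cons_cons]; rfl

theorem pv_setdefault_modify (d : PySem.Dict String (PySem.Set String)) (k : String)
    (v0 : PySem.Set String) (f : PySem.Set String → PySem.Set String) :
    ((if d.contains k = true then d else d.insert k v0) : PySem.Dict String (PySem.Set String)).modify k v0 f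
      = d.modify k v0 f := by
  split_ifs with h
  · rfl
  · have h' : d.contains k = false := by cases hb : d.contains k <;> simp_all
    simp only [PySem.Dict.modify]
    rw [PySem.Dict.getD_insert_self, PySem.Dict.insert_insert_self,
      PySem.Dict.getD_of_not_contains]
    exact h'

-- A's inner loop is the fold over consecutive pairs of the cumulative prefix list
theorem pv_inner (rest : List String) (b : String)
    (d : PySem.Dict String (PySem.Set String)) :
    (rest.foldl
        (fun (st : PySem.Dict String (PySem.Set String) × String) part =>
          let d := st.1
          let base_part := st.2
          let d := if d.contains base_part = true then d
                   else d.insert base_part PySem.Set.empty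
          let d := d.modify base_part PySem.Set.empty
                     (fun s => PySem.Set.add s (base_part ++ "/" ++ part))
          (d, base_part ++ "/" ++ part))
        (d, b)).1
      = ((pvPrefixes (b :: rest)).zip (pvPrefixes (b :: rest)).tail).foldl
          (fun d pc => d.modify pc.1 PySem.Set.empty (fun s => PySem.Set.add s pc.2)) d := by
  induction rest generalizing b d with
  | nil =>
      rw [pv_prefixes_single]
      simp
  | cons p l ih =>
      rw [pv_prefixes_cons_cons]
      rw [pv_prefixes_head (b ++ "/" ++ p) l]
      simp only [List.foldl_cons, List.tail_cons, List.zip_cons_cons]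
      rw [← pv_prefixes_head (b ++ "/" ++ p) l]
      rw [ih (b ++ "/" ++ p)]
      congr 1
      exact pv_setdefault_modify d b PySem.Set.empty
        (fun s => PySem.Set.add s (b ++ "/" ++ p))

theorem pvSp_pre (cs : List Char) : ∀ (pre : List Char),
    pvSp pre cs = (pre ++ (pvSp [] cs).headI) :: (pvSp [] cs).tail := by
  induction cs with
  | nil => intro pre; simp [pvSp]
  | cons c t ih =>
      intro pre
      by_cases hc : c = '/'
      · subst hc; simp [pvSp]
      · rw [show pvSp pre (c :: t) = pvSp (pre ++ [c]) t by simp [pvSp, hc],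
            show pvSp [] (c :: t) = pvSp [c] t by simp [pvSp, hc]]
        rw [ih (pre ++ [c]), ih [c]]
        simp

theorem pv_go (cs : List Char) : ∀ (fuel : Nat), cs.length < fuel → ∀ (cur : List Char) (acc : List (List Char)),
    PySem.Chars.splitOn.go ['/'] fuel cs cur acc = acc.reverse ++ pvSp cur.reverse cs := by
  induction cs with
  | nil =>
      intro fuel h cur acc
      cases fuel with
      | zero => omega
      | succ f => simp [PySem.Chars.splitOn.go, pvSp]
  | cons c t ih =>
      intro fuel h cur acc
      cases fuel with
      | zero => omega
      | succ f =>
        rw [PySem.Chars.splitOn.go]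
        by_cases hc : c = '/'
        · subst hc
          have hpre : List.isPrefixOf ['/'] ('/' :: t) = true := by simp [List.isPrefixOf]
          simp only [hpre, if_pos, List.length_cons, List.length_nil, Nat.zero_add,
            List.drop_succ_cons, List.drop_zero]
          rw [ih f (by simpa using h) [] (cur.reverse :: acc)]
          simp [pvSp]
        · have hpre : List.isPrefixOf ['/'] (c :: t) = false := by
            simp [List.isPrefixOf]
            exact fun h' => absurd h'.symm hc
          simp only [hpre, Bool.false_eq_true, if_false]
          rw [ih f (by simpa using h) (c :: cur) acc]
          simp [pvSp, hc]

theorem pv_splitOn_eq (cs : List Char) : PySem.Chars.splitOn cs ['/'] = pvSp [] cs := by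
  rw [PySem.Chars.splitOn, pv_go cs (cs.length + 1) (by omega) [] []]
  simp

-- the cumulative prefix list of the split parts IS the cut-prefix list
theorem pv_prefixes_sp (cs : List Char) : ∀ (b : List Char),
    pvPrefixes ((pvSp b cs).map String.ofList) = (pvCutsAfter b cs).map String.ofList := by
  induction cs with
  | nil => intro b; simp [pvSp, pvCutsAfter, pv_prefixes_single]
  | cons c t ih =>
      intro b
      by_cases hc : c = '/'
      · subst hc
        rw [show pvSp b ('/' :: t) = b :: pvSp [] t by simp [pvSp]]
        rw [pvSp_pre t []]
        simp only [List.nil_append, List.map_cons]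
        rw [pv_prefixes_cons_cons]
        rw [show String.ofList b ++ "/" ++ String.ofList (pvSp [] t).headI
              = String.ofList (b ++ ['/'] ++ (pvSp [] t).headI) by
            rw [String.ofList_append, String.ofList_append]]
        rw [show String.ofList (b ++ ['/'] ++ (pvSp [] t).headI) :: List.map String.ofList (pvSp [] t).tail
              = (pvSp (b ++ ['/']) t).map String.ofList by rw [pvSp_pre t (b ++ ['/'])]; rfl]
        rw [ih (b ++ ['/'])]
        rw [show pvCutsAfter b ('/' :: t) = b :: pvCutsAfter (b ++ ['/']) t by simp [pvCutsAfter]]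
        rfl
      · rw [show pvSp b (c :: t) = pvSp (b ++ [c]) t by simp [pvSp, hc],
            show pvCutsAfter b (c :: t) = pvCutsAfter (b ++ [c]) t by simp [pvCutsAfter, hc]]
        exact ih (b ++ [c])

-- B's cut positions, mapped through take, are the cut-prefix list
theorem pv_enum_cuts (cs : List Char) : ∀ (pre : List Char),
    (((PySem.List.enumerate cs (pre.length : Int)).filter (fun p => p.2 == '/')).map (·.1)
        ++ [(pre.length : Int) + cs.length]).map (fun i => (pre ++ cs).take i.toNat)
      = pvCutsAfter pre cs := by
  induction cs with
  | nil =>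
      intro pre
      simp [PySem.List.enumerate_nil, pvCutsAfter]
  | cons c t ih =>
      intro pre
      have hlen : ((pre ++ [c]).length : Int) = (pre.length : Int) + 1 := by simp
      have harr : (pre.length : Int) + ((c :: t).length : Int) = ((pre ++ [c]).length : Int) + (t.length : Int) := by
        simp; omega
      by_cases hc : c = '/'
      · subst hc
        rw [PySem.List.enumerate_cons]
        simp only [List.filter_cons, List.map_cons, beq_self_eq_true, if_pos, List.cons_append]
        rw [show pre ++ '/' :: t = pre ++ ['/'] ++ t by simp]
        rw [show ((pre.length : Int)).toNat = pre.length by simp]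
        rw [show (pre ++ ['/'] ++ t).take pre.length = pre by
              rw [List.append_assoc]; exact List.take_left' rfl]
        rw [harr, ← hlen]
        rw [ih (pre ++ ['/'])]
        simp [pvCutsAfter]
      · rw [PySem.List.enumerate_cons]
        have hce : (c == '/') = false := by simpa using hc
        simp only [List.filter_cons, hce, Bool.false_eq_true, if_false]
        rw [show pvCutsAfter pre (c :: t) = pvCutsAfter (pre ++ [c]) t by simp [pvCutsAfter, hc]]
        rw [← ih (pre ++ [c])]
        rw [show pre ++ c :: t = pre ++ [c] ++ t by simp]
        rw [harr, ← hlen]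

-- every cut position of B is nonnegative
theorem pv_cuts_nonneg (cs : List Char) (i : Int)
    (h : i ∈ ((PySem.List.enumerate cs 0).filter (fun p => p.2 == '/')).map (·.1)
        ++ [(cs.length : Int)]) : 0 ≤ i := by
  rcases List.mem_append.1 h with h | h
  · obtain ⟨p, hp, rfl⟩ := List.mem_map.1 h
    have hp' := List.mem_of_mem_filter hp
    obtain ⟨k, _, rfl⟩ := (PySem.List.mem_enumerate_iff _ _ _).1 hp'
    simp
  · simp at h
    omega

-- B's string prefix list equals the cumulative prefix list of A's parts
theorem pv_cuts_eq_prefixes (file : String) :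
    (((PySem.List.enumerate file.toList 0).filter (fun p => p.2 == '/')).map (·.1)
        ++ [PySem.Str.len file]).map (fun i => PySem.Str.slice file none (some i))
      = pvPrefixes ((PySem.Str.split? file "/").getD []) := by
  have hsplit : (PySem.Str.split? file "/").getD []
      = (pvSp [] file.toList).map String.ofList := by
    rw [PySem.Str.split?]
    simp [PySem.Chars.split?, pv_splitOn_eq]
  rw [hsplit, pv_prefixes_sp file.toList []]
  have hthis := pv_enum_cuts file.toList []
  simp only [List.length_nil, Nat.cast_zero, List.nil_append, Int.zero_add] at hthis
  rw [← hthis, List.map_map]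
  rw [show PySem.Str.len file = ((file.toList.length : Int)) by simp [PySem.Str.len]]
  apply List.map_congr_left
  intro i hi
  have hnn : 0 ≤ i := pv_cuts_nonneg file.toList i hi
  simp only [Function.comp]
  apply String.ext
  simp only [PySem.Str.slice, String.toList_ofList, PySem.Chars.slice_eq_listSlice]
  exact PySem.List.slice_to _ hnn

-- A's per-file body equals B's per-file body
theorem pv_body_eq (file : String) (d : PySem.Dict String (PySem.Set String)) :
    (let parts := (PySem.Str.split? file "/").getD []
     match parts with
     | [] => d
     | base :: rest =>
       (rest.foldl
          (fun (st : PySem.Dict String (PySem.Set String) × String) part =>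
            let d := st.1
            let base_part := st.2
            let d := if d.contains base_part = true then d
                     else d.insert base_part PySem.Set.empty
            let d := d.modify base_part PySem.Set.empty
                       (fun s => PySem.Set.add s (base_part ++ "/" ++ part))
            (d, base_part ++ "/" ++ part))
          (d, base)).1)
    = (let cuts : List Int :=
        ((PySem.List.enumerate file.toList 0).filter (fun p => p.2 == '/')).map (·.1)
          ++ [PySem.Str.len file]
       (cuts.zip cuts.tail).foldl
        (fun d ab =>
          d.modify (PySem.Str.slice file none (some ab.1)) PySem.Set.empty
            (fun s => PySem.Set.add s (PySem.Str.slice file none (some ab.2))))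
        d) := by
  have hcuts := pv_cuts_eq_prefixes file
  simp only
  -- rewrite B's fold over Int cuts as the fold over the string prefix list
  rw [show ∀ (cuts : List Int),
        (cuts.zip cuts.tail).foldl
          (fun d ab =>
            d.modify (PySem.Str.slice file none (some ab.1)) PySem.Set.empty
              (fun s => PySem.Set.add s (PySem.Str.slice file none (some ab.2)))) d
        = (((cuts.map (fun i => PySem.Str.slice file none (some i))).zip
              (cuts.map (fun i => PySem.Str.slice file none (some i))).tail).foldl
            (fun d pc => d.modify pc.1 PySem.Set.empty (fun s => PySem.Set.add s pc.2)) d)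
      from fun cuts => by
        rw [← List.map_tail, List.zip_map, List.foldl_map]
        rfl]
  rw [hcuts]
  cases hp : (PySem.Str.split? file "/").getD [] with
  | nil => simp [pvPrefixes]
  | cons base rest => exact pv_inner rest base d

-- ===== VERDICT (by name: the statement is the Claim_ definition above) =====
theorem get_all_module_path_py_spec : Claim_equal_get_all_module_path_py := by
  intro file_list _
  unfold Spec_get_all_module_path_py get_all_module_path_py get_all_module_path_py_alt
  congr 1
  apply PySem.List.foldl_congr_mem
  intro d file _
  exact pv_body_eq file d
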